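-- pv_equiv track=rewrite | github.com/Gjiha/Universita | Primo anno/Programmazione/programi vscode/esame/appello_sbagliato/FrancescoCosciotti.py | initial_to_substring
-- ===== SOURCE A (Python) =====
-- def initial_to_substring(a):
--
--     d = {}
--
--     l = []
--
--     l = a.split()
--
--     for c in l:
--         d[c[0]] = d.get(c[0],'')
--         if len(c) > len(d[c[0]]):
--             d[c[0]] = c
--
--
--     return d
-- ===== SOURCE B (Python) =====
-- def initial_to_substring(a):
--     groups = {}
--     for w in a.split():
--         groups[w[0]] = groups.get(w[0], []) + [w]
--     return {k: max(ws, key=len) for k, ws in groups.items()}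
-- ===== Notes on version B (the rewrite author's own statement) =====
-- stated objective: alternative
-- what changed: B first groups the words by initial letter into a dict of lists in one pass, then maps each group to its first longest word with max(key=len), instead of A's single pass that maintains the running best word per initial.
import Mathlib
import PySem

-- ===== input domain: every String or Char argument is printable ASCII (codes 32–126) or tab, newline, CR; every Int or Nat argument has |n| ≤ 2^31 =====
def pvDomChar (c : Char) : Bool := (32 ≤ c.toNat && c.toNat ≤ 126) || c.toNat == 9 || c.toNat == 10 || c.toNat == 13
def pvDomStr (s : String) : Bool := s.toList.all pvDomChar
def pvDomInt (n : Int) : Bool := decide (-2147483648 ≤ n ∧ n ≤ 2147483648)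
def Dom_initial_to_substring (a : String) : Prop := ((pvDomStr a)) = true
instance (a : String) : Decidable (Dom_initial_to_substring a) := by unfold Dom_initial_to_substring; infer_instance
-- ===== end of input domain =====

-- B groups the words by initial into a dict of lists, then maps each group to its first
-- longest word, instead of A's single pass keeping the running best per initial
-- (objective: alternative decomposition, same cost).


-- ===== PORT A =====
-- one step of A's loop body: d[c[0]] = d.get(c[0],''); if len(c) > len(d[c[0]]): d[c[0]] = c
-- (c[0] via PySem.Str.pyGet?; none is unreachable because split() yields nonempty words)
def pvStepA (d : PySem.Dict String String) (c : String) : PySem.Dict String String :=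
  match PySem.Str.pyGet? c 0 with
  | none => d
  | some ch =>
    let k := String.ofList [ch]
    let d1 := d.insert k (d.getD k "")
    if PySem.Str.len c > PySem.Str.len (d1.getD k "") then d1.insert k c else d1

def initial_to_substring (a : String) : List (String × String) :=
  ((PySem.Str.split₀ a).foldl pvStepA PySem.Dict.empty).items

-- ===== PORT B =====
-- one step of B's grouping loop: groups[w[0]] = groups.get(w[0], []) + [w]
def pvStepB (g : PySem.Dict String (List String)) (c : String) : PySem.Dict String (List String) :=
  match PySem.Str.pyGet? c 0 with
  | none => g
  | some ch =>
    let k := String.ofList [ch]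
    g.insert k (g.getD k [] ++ [c])

-- max(ws, key=len); "" is unreachable (groups hold nonempty lists)
def pvBest (ws : List String) : String :=
  match PySem.List.max? ws PySem.Str.len with
  | some w => w
  | none => ""

def initial_to_substring_alt (a : String) : List (String × String) :=
  let groups := (PySem.Str.split₀ a).foldl pvStepB PySem.Dict.empty
  groups.items.map (fun p => (p.1, pvBest p.2))

-- ===== PRECONDITION & SPEC =====
def Spec_initial_to_substring (a : String) (out : List (String × String)) : Prop := out = initial_to_substring_alt a
instance (a : String) (out : List (String × String)) : Decidable (Spec_initial_to_substring a out) := by unfold Spec_initial_to_substring; infer_instance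

-- ===== CLAIM (what is proved, stated in full; the proofs are below) =====
def Claim_equal_initial_to_substring : Prop := ∀ (a : String), Dom_initial_to_substring a → Spec_initial_to_substring a (initial_to_substring a)

-- ===== LEMMAS AND PROOFS =====

-- the invariant linking A's dict of best words to B's dict of groups
def pvInv (d : PySem.Dict String String) (g : PySem.Dict String (List String)) : Prop :=
  d.items = g.items.map (fun p => (p.1, pvBest p.2)) ∧ g.keys.Nodup ∧ ∀ p ∈ g.items, p.2 ≠ []

-- max of a one-longer list: the new element wins only when strictly longer
theorem pvMax?_append_singleton {α κ : Type} [LT κ] [DecidableLT κ] (ws : List α) (c : α) (key : α → κ) :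
    PySem.List.max? (ws ++ [c]) key =
      match PySem.List.max? ws key with
      | none => some c
      | some b => if key b < key c then some c else some b := by
  unfold PySem.List.max?
  rw [List.foldl_append]
  cases List.foldl
      (fun acc x => match acc with | none => some x | some m => if key m < key x then some x else some m)
      none ws <;> rfl

theorem pvInv_step (d : PySem.Dict String String) (g : PySem.Dict String (List String))
    (h : pvInv d g) (c : String) : pvInv (pvStepA d c) (pvStepB g c) := by
  obtain ⟨hitems, hnd, hne⟩ := h
  unfold pvStepA pvStepB
  cases hch : PySem.Str.pyGet? c 0 with
  | none => exact ⟨hitems, hnd, hne⟩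
  | some ch =>
    simp only
    set k := String.ofList [ch] with hk
    -- c is a nonempty word
    have hclen : 0 < PySem.Str.len c := by
      simp only [PySem.Str.pyGet?] at hch
      cases hcl : c.toList with
      | nil => rw [hcl] at hch; simp [PySem.Chars.pyGet?, PySem.List.pyGet?, PySem.List.pyIdx?] at hch
      | cons x t => simp [PySem.Str.len, hcl]
    have hcont : d.contains k = g.contains k := by
      simp only [PySem.Dict.contains, hitems, List.any_map]
      rfl
    by_cases hc : g.contains k = true
    · -- the initial was seen before: A updates the best, B appends to the group
      have hget : ∃ ws, g.get? k = some ws := by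
        cases hg : g.get? k with
        | none => rw [PySem.Dict.get?_eq_none_iff_contains] at hg; rw [hg] at hc; exact absurd hc (by simp)
        | some ws => exact ⟨ws, rfl⟩
      obtain ⟨ws, hws⟩ := hget
      have hgD : g.getD k [] = ws := PySem.Dict.getD_of_get?_eq_some g [] hws
      have hwsmem : (k, ws) ∈ g.items := PySem.Dict.mem_items_of_get?_eq_some g hws
      have hwsne : ws ≠ [] := hne (k, ws) hwsmem
      -- d's entry at k is the best of the group ws
      have hfind : List.find? (fun p => p.1 == k) g.items = some (k, ws) := by
        have h1 := hws
        simp only [PySem.Dict.get?] at h1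
        cases hf : List.find? (fun p => p.1 == k) g.items with
        | none => rw [hf] at h1; simp at h1
        | some q =>
          rw [hf] at h1
          have hq1 := List.find?_some hf
          simp only at hq1
          obtain ⟨q1, q2⟩ := q
          simp_all
      have hdget : d.get? k = some (pvBest ws) := by
        simp only [PySem.Dict.get?, hitems, List.find?_map]
        have hcomp : ((fun (p : String × String) => p.1 == k) ∘ fun (p : String × List String) => (p.1, pvBest p.2)) = fun p => p.1 == k := rfl
        rw [hcomp, hfind]
        rfl
      have hdD : d.getD k "" = pvBest ws := PySem.Dict.getD_of_get?_eq_some d "" hdget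
      have hdc : d.contains k = true := by rw [hcont]; exact hc
      -- every entry of g with key k is (k, ws), every entry of d with key k is (k, pvBest ws)
      have hqk : ∀ q ∈ g.items, q.1 = k → q = (k, ws) := by
        intro q hq hq1
        obtain ⟨q1, q2⟩ := q
        simp only at hq1
        subst hq1
        have h2 := PySem.Dict.get?_of_mem_items g hq hnd
        rw [hws] at h2
        simp_all
      -- d.insert k (d.getD k "") = d
      have hins : d.insert k (d.getD k "") = d := by
        apply PySem.Dict.ext
        rw [PySem.Dict.items_insert_of_contains d _ hdc, hitems]
        rw [List.map_map]
        apply List.map_congr_left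
        intro q hq
        by_cases hq1 : q.1 = k
        · have := hqk q hq hq1
          subst this
          simp [hdD]
        · simp [Function.comp, hq1]
      rw [hins, hdD, hgD]
      -- the best of the extended group
      have hbest : pvBest (ws ++ [c]) =
          if PySem.Str.len (pvBest ws) < PySem.Str.len c then c else pvBest ws := by
        have hmax : PySem.List.max? ws PySem.Str.len = some (pvBest ws) := by
          cases hm : PySem.List.max? ws PySem.Str.len with
          | none => exact absurd ((PySem.List.max?_eq_none_iff ws _).1 hm) hwsne
          | some b => simp [pvBest, hm]
        unfold pvBest
        rw [pvMax?_append_singleton, hmax]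
        by_cases hlt : PySem.Str.len (pvBest ws) < PySem.Str.len c
        · show (match (if PySem.Str.len (pvBest ws) < PySem.Str.len c then some c else some (pvBest ws) : Option String) with
                | some w => w | none => "") = _
          rw [if_pos hlt, if_pos hlt]
        · show (match (if PySem.Str.len (pvBest ws) < PySem.Str.len c then some c else some (pvBest ws) : Option String) with
                | some w => w | none => "") = _
          rw [if_neg hlt, if_neg hlt]
      simp only [gt_iff_lt]
      by_cases hlt : PySem.Str.len (pvBest ws) < PySem.Str.len c
      · rw [if_pos hlt]
        refine ⟨?_, ?_, ?_⟩
        · rw [PySem.Dict.items_insert_of_contains d _ hdc,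
              PySem.Dict.items_insert_of_contains g _ hc, hitems, List.map_map, List.map_map]
          apply List.map_congr_left
          intro q hq
          by_cases hq1 : q.1 = k
          · simp [Function.comp, hq1, hbest]
            intro h'
            exfalso
            simp [PySem.Str.len] at hlt
            omega
          · simp [Function.comp, hq1]
        · rw [PySem.Dict.keys_insert_of_contains g _ hc]; exact hnd
        · intro p hp
          rw [PySem.Dict.mem_items_insert] at hp
          rcases hp with hp | ⟨hp, _⟩
          · subst hp; simp
          · exact hne p hp
      · rw [if_neg hlt]
        refine ⟨?_, ?_, ?_⟩
        · rw [PySem.Dict.items_insert_of_contains g _ hc, hitems, List.map_map]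
          apply List.map_congr_left
          intro q hq
          by_cases hq1 : q.1 = k
          · have := hqk q hq hq1
            subst this
            simp [Function.comp, hbest]
            intro h'
            exfalso
            simp [PySem.Str.len] at hlt
            omega
          · simp [Function.comp, hq1]
        · rw [PySem.Dict.keys_insert_of_contains g _ hc]; exact hnd
        · intro p hp
          rw [PySem.Dict.mem_items_insert] at hp
          rcases hp with hp | ⟨hp, _⟩
          · subst hp; simp
          · exact hne p hp
    · -- a fresh initial: both append a new entry
      have hc' : g.contains k = false := by simpa using hc
      have hdc : d.contains k = false := by rw [hcont]; exact hc'
      have hgD : g.getD k [] = [] := PySem.Dict.getD_of_not_contains g [] hc'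
      have hdD : d.getD k "" = "" := PySem.Dict.getD_of_not_contains d "" hdc
      rw [hdD, hgD, PySem.Dict.getD_insert_self]
      have hpos : PySem.Str.len c > PySem.Str.len "" := by
        simp only [PySem.Str.len]
        simpa using hclen
      rw [if_pos hpos, PySem.Dict.insert_insert_self]
      refine ⟨?_, ?_, ?_⟩
      · rw [PySem.Dict.items_insert_of_not_contains d _ hdc,
            PySem.Dict.items_insert_of_not_contains g _ hc', List.map_append, hitems]
        simp [pvBest, PySem.List.max?]
      · rw [PySem.Dict.keys_insert_of_not_contains g _ hc']
        refine List.Nodup.append hnd (List.nodup_singleton k) ?_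
        intro x hx hx'
        rw [List.mem_singleton] at hx'
        subst hx'
        exact absurd ((PySem.Dict.contains_iff_mem_keys g k).2 hx) (by simp [hc'])
      · intro p hp
        rw [PySem.Dict.mem_items_insert] at hp
        rcases hp with hp | ⟨hp, _⟩
        · subst hp; simp
        · exact hne p hp

theorem pvInv_foldl (l : List String) (d : PySem.Dict String String)
    (g : PySem.Dict String (List String)) (h : pvInv d g) :
    pvInv (l.foldl pvStepA d) (l.foldl pvStepB g) := by
  induction l generalizing d g with
  | nil => exact h
  | cons c t ih => exact ih _ _ (pvInv_step d g h c)

-- ===== VERDICT (by name: the statement is the Claim_ definition above) =====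
theorem initial_to_substring_spec : Claim_equal_initial_to_substring := by
  intro a _
  unfold Spec_initial_to_substring initial_to_substring initial_to_substring_alt
  have h0 : pvInv PySem.Dict.empty PySem.Dict.empty := by
    refine ⟨rfl, ?_, ?_⟩ <;> simp [PySem.Dict.empty, PySem.Dict.keys]
  exact (pvInv_foldl (PySem.Str.split₀ a) _ _ h0).1
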